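-- pv_equiv track=rewrite | github.com/sarahjxu/ESC180-CIV102 | Lectures/L20-3.py | drop_course_good
-- ===== SOURCE A (Python) =====
-- def drop_course_good(grades):
--     i = 0
--     while i < len(grades):
--         if grades[i] < 4.0:
--             del grades[i]
--         else:
--             i += 1
--     return grades
-- ===== SOURCE B (Python) =====
-- def drop_course_good(grades):
--     # In-place compaction with a write cursor: one O(n) pass, then truncate.
--     w = 0
--     for i in range(len(grades)):
--         if not (grades[i] < 4.0):
--             grades[w] = grades[i]
--             w += 1
--     del grades[w:]
--     return grades
-- ===== Notes on version B (the rewrite author's own statement) =====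
-- stated objective: faster
-- what changed: Replaces the delete-while-scan (each del shifts the tail) with a single-pass in-place compaction using a write cursor followed by one tail truncation.
import Mathlib
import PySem

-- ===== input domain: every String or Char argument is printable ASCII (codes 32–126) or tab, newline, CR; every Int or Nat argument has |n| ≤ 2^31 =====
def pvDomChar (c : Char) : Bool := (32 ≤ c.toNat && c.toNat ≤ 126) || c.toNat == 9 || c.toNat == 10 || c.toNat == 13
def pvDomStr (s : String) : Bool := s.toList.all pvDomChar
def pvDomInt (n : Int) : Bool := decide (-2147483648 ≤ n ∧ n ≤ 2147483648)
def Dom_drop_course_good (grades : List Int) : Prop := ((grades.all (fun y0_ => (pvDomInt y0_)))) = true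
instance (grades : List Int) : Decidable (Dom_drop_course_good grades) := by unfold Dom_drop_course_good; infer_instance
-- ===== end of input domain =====

-- B replaces A's quadratic delete-while-scan with a single-pass write-cursor compaction (faster).
-- A mutates its argument in place; the equivalence proved here is about the return value
-- (B performs the same in-place mutation in Python).

-- ===== PORT A =====
-- A's while loop: if grades[i] < 4.0: del grades[i] else: i += 1
def dropLoopA (i : Nat) (g : List Int) : List Int :=
  if h : i < g.length then
    if g[i] < 4 then
      dropLoopA i (g.eraseIdx i)
    else
      dropLoopA (i + 1) g
  else
    g
termination_by g.length - i
decreasing_by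
  · simp [List.length_eraseIdx, h]; omega
  · omega

def drop_course_good (grades : List Int) : List Int := dropLoopA 0 grades

-- ===== PORT B =====
-- Source B: write cursor w; grades[w] = grades[i] builds the kept prefix (modelled as the
-- accumulator list, whose length is w); del grades[w:] drops the leftover tail.
def drop_course_good_alt (grades : List Int) : List Int :=
  (PySem.List.pyRange 0 grades.length 1).foldl
    (fun acc i =>
      if ¬ (PySem.List.pyGetD grades i 0 < 4) then acc ++ [PySem.List.pyGetD grades i 0]
      else acc)
    []

-- ===== PRECONDITION & SPEC =====
def Spec_drop_course_good (grades : List Int) (out : List Int) : Prop := out = drop_course_good_alt grades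
instance (grades : List Int) (out : List Int) : Decidable (Spec_drop_course_good grades out) := by unfold Spec_drop_course_good; infer_instance

-- ===== CLAIM (what is proved, stated in full; the proofs are below) =====
def Claim_equal_drop_course_good : Prop := ∀ (grades : List Int), Dom_drop_course_good grades → Spec_drop_course_good grades (drop_course_good grades)

-- ===== LEMMAS AND PROOFS =====
theorem dropLoopA_eq (i : Nat) (g : List Int) :
    dropLoopA i g = g.take i ++ (g.drop i).filter (fun x => decide ¬ (x < 4)) := by
  rw [dropLoopA]
  split
  · rename_i h
    have hdrop : g.drop i = g[i] :: g.drop (i+1) := List.drop_eq_getElem_cons h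
    have h1 : (g.take i).length = i := by simp; omega
    split
    · rename_i hlt
      rw [dropLoopA_eq i (g.eraseIdx i), List.eraseIdx_eq_take_drop_succ]
      rw [List.take_append_of_le_length h1.ge, List.drop_append_of_le_length h1.ge]
      rw [List.take_take, hdrop, List.filter_cons]
      simp [hlt]
    · rename_i hge
      have ht : g.take (i+1) = g.take i ++ [g[i]] := by
        rw [List.take_add_one]; simp [List.getElem?_eq_getElem h]
      rw [dropLoopA_eq (i+1) g, hdrop, List.filter_cons, if_pos (by simpa using hge), ht,
        List.append_assoc, List.singleton_append]
  · rename_i h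
    have hle : g.length ≤ i := Nat.le_of_not_lt h
    simp [List.take_of_length_le hle, List.drop_of_length_le hle]
termination_by g.length - i
decreasing_by
  · omega
  · simp [List.length_eraseIdx, *]; omega

theorem alt_eq_filter (g : List Int) :
    drop_course_good_alt g = g.filter (fun x => decide ¬ (x < 4)) := by
  unfold drop_course_good_alt
  rw [show (g.length : Int) = PySem.List.len g from rfl,
    PySem.List.foldl_pyRange_zero_pyGetD (f := fun acc x => if ¬ (x < 4) then acc ++ [x] else acc)]
  rw [PySem.List.foldl_append_ite_eq_filter]
  simp

-- ===== VERDICT (by name: the statement is the Claim_ definition above) =====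
theorem drop_course_good_spec : Claim_equal_drop_course_good := by
  intro g _
  show drop_course_good g = drop_course_good_alt g
  rw [drop_course_good, dropLoopA_eq, alt_eq_filter]
  simp
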